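-- pv_equiv track=rewrite | github.com/alphagov/observe-prom-loadtest | locust-tools/locustfile.py | group_metrics_by_name
-- ===== SOURCE A (Python) =====
-- def group_metrics_by_name(metrics):
--     bucketed_metrics = {}
--     for i in metrics:
--         bucket = i['__name__']
--         if not bucket in bucketed_metrics:
--             bucketed_metrics[bucket] = {}
--
--         for label in i.keys():
--             if label not in bucketed_metrics[bucket]:
--                 bucketed_metrics[bucket][label] = set()
--             bucketed_metrics[bucket][label].add(i[label])
--
--     return bucketed_metrics
-- ===== SOURCE B (Python) =====
-- def group_metrics_by_name(metrics):
--     # Phase 1: group the metric dicts by their '__name__'.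
--     groups = {}
--     for m in metrics:
--         groups.setdefault(m['__name__'], []).append(m)
--     # Phase 2: aggregate each group's label values into sets.
--     result = {}
--     for name, ms in groups.items():
--         labels = {}
--         for m in ms:
--             for k, v in m.items():
--                 labels.setdefault(k, set()).add(v)
--         result[name] = labels
--     return result
-- ===== Notes on version B (the rewrite author's own statement) =====
-- stated objective: alternative
-- what changed: B separates grouping from aggregation: a first pass buckets the metric dicts by '__name__' via setdefault into lists, a second pass builds each bucket's label->set dict fresh from its grouped metrics, instead of A's single fused nested loop that mutates nested dicts in place.
import Mathlib
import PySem

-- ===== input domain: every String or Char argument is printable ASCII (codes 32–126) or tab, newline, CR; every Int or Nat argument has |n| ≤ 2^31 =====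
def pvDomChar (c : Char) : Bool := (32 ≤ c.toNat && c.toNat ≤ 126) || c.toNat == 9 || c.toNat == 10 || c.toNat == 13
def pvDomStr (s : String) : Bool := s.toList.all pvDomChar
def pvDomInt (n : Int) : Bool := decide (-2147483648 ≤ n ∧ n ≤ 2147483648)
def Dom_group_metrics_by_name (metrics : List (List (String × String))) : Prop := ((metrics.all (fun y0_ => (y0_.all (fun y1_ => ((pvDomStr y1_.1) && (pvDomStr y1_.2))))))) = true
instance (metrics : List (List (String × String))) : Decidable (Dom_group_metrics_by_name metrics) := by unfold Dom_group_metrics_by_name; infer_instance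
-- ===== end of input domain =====

-- B separates grouping (a first pass bucketing the metric dicts by '__name__') from aggregation
-- (a second pass building each bucket's label→value-set dict), instead of A's fused nested loop;
-- same cost, different decomposition (objective: alternative).

-- i['__name__'] in total form: the `none` case (Python KeyError) is excluded by Pre_.
def pvName (m : List (String × String)) : String := (m.lookup "__name__").getD ""

-- ===== PORT A =====
-- inner loop body of A: 'if label not in bucketed_metrics[bucket]: … = set()' then '….add(i[label])'
-- (each metric is a Python dict, so keys are distinct and i[label] is the pair's value)
def pvAInner (bucket : String)
    (st : PySem.Dict String (PySem.Dict String (PySem.Set String)))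
    (kv : String × String) : PySem.Dict String (PySem.Dict String (PySem.Set String)) :=
  let inn := st.getD bucket PySem.Dict.empty
  let inn := if inn.contains kv.1 then inn else inn.insert kv.1 PySem.Set.empty
  st.insert bucket (inn.insert kv.1 (PySem.Set.add (inn.getD kv.1 PySem.Set.empty) kv.2))

-- one iteration of A's outer loop over `metrics`
def pvAStep (st : PySem.Dict String (PySem.Dict String (PySem.Set String)))
    (i : List (String × String)) : PySem.Dict String (PySem.Dict String (PySem.Set String)) :=
  i.foldl (pvAInner (pvName i))
    (if st.contains (pvName i) then st else st.insert (pvName i) PySem.Dict.empty)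

def group_metrics_by_name (metrics : List (List (String × String))) : List (String × List (String × List String)) :=
  ((metrics.foldl pvAStep PySem.Dict.empty).items).map (fun p => (p.1, p.2.items))

-- ===== PORT B =====
-- 'labels.setdefault(k, set()).add(v)'
def pvBStep (acc : PySem.Dict String (PySem.Set String)) (kv : String × String) :
    PySem.Dict String (PySem.Set String) :=
  acc.insert kv.1 (PySem.Set.add (acc.getD kv.1 PySem.Set.empty) kv.2)

-- phase 2 inner: fold one group's metrics into a fresh label→set dict
def pvBLabels (ms : List (List (String × String))) : PySem.Dict String (PySem.Set String) :=
  ms.foldl (fun acc m => m.foldl pvBStep acc) PySem.Dict.empty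

-- 'groups.setdefault(m["__name__"], []).append(m)'
def pvBGroupStep (g : PySem.Dict String (List (List (String × String))))
    (m : List (String × String)) : PySem.Dict String (List (List (String × String))) :=
  g.insert (pvName m) (g.getD (pvName m) [] ++ [m])

def group_metrics_by_name_alt (metrics : List (List (String × String))) : List (String × List (String × List String)) :=
  let groups := metrics.foldl pvBGroupStep PySem.Dict.empty
  groups.items.map (fun p => (p.1, (pvBLabels p.2).items))

-- ===== PRECONDITION & SPEC =====
-- Pre_ excludes exactly the inputs where the Python A raises KeyError (a metric without the
-- '__name__' key); B raises KeyError there too.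
def Pre_group_metrics_by_name (metrics : List (List (String × String))) : Prop :=
  ∀ m ∈ metrics, ∃ p ∈ m, p.1 = "__name__"
instance (metrics : List (List (String × String))) : Decidable (Pre_group_metrics_by_name metrics) := by
  unfold Pre_group_metrics_by_name; infer_instance

def pvWitness_group_metrics_by_name : (List (List (String × String))) :=
  [[("__name__", "up"), ("job", "a")], [("__name__", "up"), ("job", "b")]]

def Spec_group_metrics_by_name (metrics : List (List (String × String))) (out : List (String × List (String × List String))) : Prop := out = group_metrics_by_name_alt metrics
instance (metrics : List (List (String × String))) (out : List (String × List (String × List String))) : Decidable (Spec_group_metrics_by_name metrics out) := by unfold Spec_group_metrics_by_name; infer_instance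

-- ===== CLAIM (what is proved, stated in full; the proofs are below) =====
def Claim_equal_group_metrics_by_name : Prop := ∀ (metrics : List (List (String × String))), Dom_group_metrics_by_name metrics → Pre_group_metrics_by_name metrics → Spec_group_metrics_by_name metrics (group_metrics_by_name metrics)

-- ===== LEMMAS AND PROOFS =====

-- the simulation map: B's grouping state, aggregated bucketwise, is A's state
def pvMapVal (g : PySem.Dict String (List (List (String × String)))) :
    PySem.Dict String (PySem.Dict String (PySem.Set String)) :=
  ⟨g.items.map (fun p => (p.1, pvBLabels p.2))⟩

theorem pvMapVal_contains (g : PySem.Dict String (List (List (String × String)))) (b : String) :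
    (pvMapVal g).contains b = g.contains b := by
  simp [pvMapVal, PySem.Dict.contains, List.any_map, Function.comp_def]

theorem pvMapVal_get? (g : PySem.Dict String (List (List (String × String)))) (b : String) :
    (pvMapVal g).get? b = (g.get? b).map pvBLabels := by
  simp [pvMapVal, PySem.Dict.get?, List.find?_map, Function.comp_def]

theorem pvMapVal_getD (g : PySem.Dict String (List (List (String × String)))) (b : String) :
    (pvMapVal g).getD b PySem.Dict.empty = pvBLabels (g.getD b []) := by
  simp only [PySem.Dict.getD, pvMapVal_get?]
  cases g.get? b <;> simp [pvBLabels, PySem.Dict.empty]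

theorem pvMapVal_items (g : PySem.Dict String (List (List (String × String)))) :
    (pvMapVal g).items = g.items.map (fun p => (p.1, pvBLabels p.2)) := rfl

theorem pvMapVal_insert (g : PySem.Dict String (List (List (String × String)))) (b : String)
    (ms : List (List (String × String))) :
    (pvMapVal g).insert b (pvBLabels ms) = pvMapVal (g.insert b ms) := by
  apply PySem.Dict.ext
  rw [PySem.Dict.items_insert, pvMapVal_contains, pvMapVal_items g]
  by_cases hc : g.contains b = true
  · rw [if_pos hc, pvMapVal_items, PySem.Dict.items_insert, if_pos hc, List.map_map, List.map_map]
    refine List.map_congr_left (fun p _ => ?_)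
    by_cases hp : p.1 = b <;> simp [hp]
  · rw [if_neg hc, pvMapVal_items, PySem.Dict.items_insert, if_neg hc, List.map_append]
    rfl

-- A's inner-loop body equals B's combined setdefault+add step, lifted to the outer dict
theorem pvAInner_eq (b : String) (st : PySem.Dict String (PySem.Dict String (PySem.Set String)))
    (kv : String × String) :
    pvAInner b st kv = st.insert b (pvBStep (st.getD b PySem.Dict.empty) kv) := by
  unfold pvAInner pvBStep
  by_cases hc : (st.getD b PySem.Dict.empty).contains kv.1 = true
  · simp [hc]
  · simp only [hc, if_neg, Bool.not_eq_true]
    simp only [Bool.not_eq_true] at hc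
    rw [PySem.Dict.getD_insert_self, PySem.Dict.insert_insert_self,
      PySem.Dict.getD_of_not_contains _ _ hc]

-- hoisting A's repeated read-modify-write of st[b] out of the inner fold
theorem pvFold_hoist (l : List (String × String))
    (st : PySem.Dict String (PySem.Dict String (PySem.Set String))) (b : String)
    (d0 x : PySem.Dict String (PySem.Set String)) :
    l.foldl (fun st kv => st.insert b (pvBStep (st.getD b d0) kv)) (st.insert b x)
      = st.insert b (l.foldl pvBStep x) := by
  induction l generalizing x with
  | nil => rfl
  | cons kv rest ih =>
    simp only [List.foldl_cons, PySem.Dict.getD_insert_self, PySem.Dict.insert_insert_self]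
    exact ih (pvBStep x kv)

theorem pvBLabels_append (ms : List (List (String × String))) (m : List (String × String)) :
    pvBLabels (ms ++ [m]) = m.foldl pvBStep (pvBLabels ms) := by
  simp [pvBLabels, List.foldl_append]

-- one outer-loop step of A simulates one grouping step of B (the metric is nonempty
-- because under Pre_ it contains the '__name__' pair)
theorem pvAStep_sim (g : PySem.Dict String (List (List (String × String))))
    (i : List (String × String)) (hne : i ≠ []) :
    pvAStep (pvMapVal g) i = pvMapVal (pvBGroupStep g i) := by
  unfold pvAStep pvBGroupStep
  rw [PySem.List.foldl_congr_mem i (pvAInner (pvName i))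
      (fun st kv => st.insert (pvName i) (pvBStep (st.getD (pvName i) PySem.Dict.empty) kv)) _
      (fun acc x _ => pvAInner_eq _ acc x)]
  rw [pvMapVal_contains]
  by_cases hc : g.contains (pvName i) = true
  · rw [if_pos hc]
    obtain ⟨kv, rest, rfl⟩ := List.exists_cons_of_ne_nil hne
    simp only [List.foldl_cons]
    rw [pvMapVal_getD, pvFold_hoist]
    have key : rest.foldl pvBStep (pvBStep (pvBLabels (g.getD (pvName (kv :: rest)) [])) kv)
        = pvBLabels (g.getD (pvName (kv :: rest)) [] ++ [kv :: rest]) := by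
      rw [pvBLabels_append]; rfl
    rw [key, pvMapVal_insert]
  · rw [if_neg hc]
    have hg : g.getD (pvName i) [] = [] :=
      PySem.Dict.getD_of_not_contains _ _ (by simp [hc])
    rw [hg, List.nil_append, pvFold_hoist,
      show i.foldl pvBStep PySem.Dict.empty = pvBLabels [i] from rfl, pvMapVal_insert]

theorem pvMain (metrics : List (List (String × String)))
    (g : PySem.Dict String (List (List (String × String))))
    (h : ∀ m ∈ metrics, m ≠ []) :
    metrics.foldl pvAStep (pvMapVal g) = pvMapVal (metrics.foldl pvBGroupStep g) := by
  induction metrics generalizing g with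
  | nil => rfl
  | cons m rest ih =>
    simp only [List.foldl_cons]
    rw [pvAStep_sim g m (h m (List.mem_cons_self))]
    exact ih _ (fun x hx => h x (List.mem_cons_of_mem _ hx))

-- ===== VERDICT (by name: the statement is the Claim_ definition above) =====
theorem group_metrics_by_name_spec : Claim_equal_group_metrics_by_name := by
  intro metrics _ hpre
  unfold Spec_group_metrics_by_name group_metrics_by_name group_metrics_by_name_alt
  have hne : ∀ m ∈ metrics, m ≠ [] := by
    intro m hm hnil
    obtain ⟨p, hp, _⟩ := hpre m hm
    simp [hnil] at hp
  have : (PySem.Dict.empty : PySem.Dict String (PySem.Dict String (PySem.Set String))) = pvMapVal ⟨[]⟩ := rfl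
  rw [this, pvMain metrics ⟨[]⟩ hne]
  simp [pvMapVal, PySem.Dict.empty, List.map_map, Function.comp]
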